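-- pv_equiv track=rewrite | github.com/SwimmingLee/ProblemSolving | (Pyton)ProblemSolving/ProblemSovling/기타/[Programmers]풍선 터트리기.py | solution
-- ===== SOURCE A (Python) =====
-- def solution(a):
--     answer = 0
--     # a의 길이는 백만
--     # 그냥 풀면 !백만  절대 풀 수 없음
--     # 그냥 봤을 때는 DP로 하는게 맞아보임
--     # DP로 상태정의를 어떻게 할건데?
--     # DP[현재 수열의 상태, 찬스여부] = 이렇게 하기엔 메모리가 터져버림
--
--     # 아니면 분할정복...?
--     # a[:mid] a[mid:] mid mid+1 아니 이건 분할정복으로 못품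
--
--     # D[i:, 찬스]
--     # 결국은 최후의 숫자를 1로 만들어야 함
--
--     # 풍선을 터트리는 순서가 중요한가?
--     # 중요하지 않다면 앞에서부터 순서대로 훑어도 되지 않을까?
--     # 풍선을 터트리는 숫자가 중요하긴 함..
--     # 그래야 다으메 어느 풍선끼리 만나는지 알 수 있음
--     # 따라서 순서대로 훑어도 보기는 어려워 보임
--
--     # 또 어떤 그리디로 풀 수 있을까?
--     # 그룹 구간에서 가장 작은게 자신이라면 살아남을 수 있음
--     # ㅇㅇㅋ 맞음 그 구간에서 가장 작은 숫자는 DP로 구현 가능(쌉가능)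
--     # .... n .... 일 때 하나만 나보다 작으면 가능함..? ㅇㅇㅋ
--     # 이렇게 구현하면 NlogN만에 구현 쌉가능!!!!!
--
--     MAX_NUMBER = 1000000000
--     MAX_LENGTH = len(a)
--     MAX_EXPONENTIAL = 20
--
--     D = [[0 for _ in range(MAX_EXPONENTIAL)] for _ in range(MAX_LENGTH)]
--
--     def initRMQ():
--         # D[i][j] : [i, i + 2^j) 구간에서 최솟값
--         # D[i][j] = max(D[i][j-1], D[i + (1<<(j-1))][j-1])
--
--         for j in range(MAX_EXPONENTIAL):
--             for i in range(MAX_LENGTH):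
--                 if j == 0:
--                     D[i][j] = a[i]
--                 else:
--                     if i + (1 << j) <= MAX_LENGTH:
--                         D[i][j] = min(D[i][j-1], D[i + (1 << (j-1))][j-1])
--
--     def queryRMQ(begin, end):
--         min_res = (MAX_NUMBER+1)
--
--         if begin == end:
--             return min_res
--
--         for exp in range(20, -1, -1):
--             if begin + (1 << exp) <= end:
--                 min_res = min(min_res, D[begin][exp])
--                 begin += (1 << exp)
--
--         return min_res
--
--     initRMQ()
--     for i in range(MAX_LENGTH):
--         u = queryRMQ(0, i)
--         v = queryRMQ(i+1, MAX_LENGTH)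
--
--         if u >= a[i] or v >= a[i]:
--             answer += 1
--
--     return answer
-- ===== SOURCE B (Python) =====
-- def solution(a):
--     INF = 1000000001  # same sentinel A's query uses for an empty side
--     n = len(a)
--     suf = [INF] * (n + 1)
--     for i in range(n - 1, -1, -1):
--         suf[i] = min(suf[i + 1], a[i])
--     answer = 0
--     pre = INF
--     for i, x in enumerate(a):
--         if pre >= x or suf[i + 1] >= x:
--             answer += 1
--         pre = min(pre, x)
--     return answer
-- ===== Notes on version B (the rewrite author's own statement) =====
-- stated objective: faster
-- what changed: Replaces A's sparse-table RMQ (O(n log n) build, O(log n) per query) with prefix-min/suffix-min running values computed in two linear passes; Pre_ excludes only lists longer than 2^20, on which A raises IndexError.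
import Mathlib
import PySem

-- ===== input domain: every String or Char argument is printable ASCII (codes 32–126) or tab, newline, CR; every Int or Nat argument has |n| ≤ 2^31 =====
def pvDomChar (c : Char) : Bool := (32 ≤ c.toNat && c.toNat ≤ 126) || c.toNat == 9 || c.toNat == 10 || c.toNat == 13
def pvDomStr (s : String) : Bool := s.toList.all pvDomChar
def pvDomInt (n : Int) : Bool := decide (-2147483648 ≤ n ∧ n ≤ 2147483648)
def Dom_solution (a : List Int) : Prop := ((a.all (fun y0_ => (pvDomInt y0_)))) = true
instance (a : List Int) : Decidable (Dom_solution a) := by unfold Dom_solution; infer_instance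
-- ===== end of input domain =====

-- B replaces A's sparse-table RMQ (O(n log n) build + log-sized queries) by prefix/suffix
-- minimum arrays computed in two linear passes (objective: faster, asymptotic O(n)).

-- ===== PORT A =====
-- a[i] is always read with 0 ≤ i < len(a), so pyGetD with default 0 is exact there.
-- The Python 2-D list D is ported as a function Nat → Nat → Int updated pointwise;
-- every read/write the Python performs is at an in-range index whenever len(a) ≤ 2^20
-- (outside that, Python raises IndexError; see Pre_solution).
def initRMQ (a : List Int) : Nat → Nat → Int :=
  (List.range 20).foldl (fun D j =>
    (List.range a.length).foldl (fun D i =>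
      if j = 0 then
        fun i' j' => if i' = i ∧ j' = j then PySem.List.pyGetD a (i : Int) 0 else D i' j'
      else if i + (1 <<< j) ≤ a.length then
        fun i' j' => if i' = i ∧ j' = j then
            min (D i (j - 1)) (D (i + (1 <<< (j - 1))) (j - 1))
          else D i' j'
      else D) D)
    (fun _ _ => 0)

def queryRMQ (D : Nat → Nat → Int) (b e : Nat) : Int :=
  if b = e then 1000000000 + 1
  else
    ((PySem.List.pyRange 20 (-1) (-1)).foldl (fun (st : Int × Nat) exp =>
      if st.2 + (1 <<< exp.toNat) ≤ e then
        (min st.1 (D st.2 exp.toNat), st.2 + (1 <<< exp.toNat))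
      else st) (1000000000 + 1, b)).1

def solution (a : List Int) : Int :=
  (List.range a.length).foldl (fun answer i =>
    if queryRMQ (initRMQ a) 0 i ≥ PySem.List.pyGetD a (i : Int) 0 ∨
       queryRMQ (initRMQ a) (i + 1) a.length ≥ PySem.List.pyGetD a (i : Int) 0 then
      answer + 1
    else answer) 0

-- ===== PORT B =====
-- suf[i] = min(suf[i+1], a[i]), built back to front (port of the range(n-1,-1,-1) loop).
def sufMins (a : List Int) : List Int :=
  a.foldr (fun x acc => min (acc.headD 1000000001) x :: acc) [1000000001]

def solution_alt (a : List Int) : Int :=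
  ((PySem.List.enumerate a).foldl (fun (st : Int × Int) p =>
    ((if st.2 ≥ p.2 ∨ PySem.List.pyGetD (sufMins a) (p.1 + 1) 0 ≥ p.2 then st.1 + 1 else st.1),
     min st.2 p.2)) (0, 1000000001)).1

-- ===== PRECONDITION & SPEC =====
-- Pre_ excludes exactly the lists longer than 2^20, on which A raises IndexError
-- (queryRMQ reads D[begin][20] but every row of D has length 20).
def Pre_solution (a : List Int) : Prop := a.length ≤ 1048576
instance (a : List Int) : Decidable (Pre_solution a) := by unfold Pre_solution; infer_instance
def pvWitness_solution : List Int := ([9, -1, 4, 4, 2])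

def Spec_solution (a : List Int) (out : Int) : Prop := out = solution_alt a
instance (a : List Int) (out : Int) : Decidable (Spec_solution a out) := by unfold Spec_solution; infer_instance

-- ===== CLAIM (what is proved, stated in full; the proofs are below) =====
def Claim_equal_solution : Prop := ∀ (a : List Int), Dom_solution a → Pre_solution a → Spec_solution a (solution a)

-- ===== LEMMAS AND PROOFS =====

-- min of a list seeded with A's sentinel 1000000001
def mins (xs : List Int) : Int := xs.foldl min 1000000001
-- true minimum of a nonempty list (what A's sparse table stores)
def tm (xs : List Int) : Int := match xs with | [] => 1000000001 | x :: t => t.foldl min x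
-- the segment [i, i+k) of a
def seg (a : List Int) (i k : Nat) : List Int := (a.drop i).take k
-- correctness of the sparse table up to level J
def Tab (a : List Int) (D : Nat → Nat → Int) (J : Nat) : Prop :=
  ∀ j, j < J → ∀ i, i + 2 ^ j ≤ a.length → D i j = tm (seg a i (2 ^ j))
-- the canonical count both programs compute
def cnt (a : List Int) : Int :=
  (List.range a.length).foldl (fun answer i =>
    if mins (a.take i) ≥ a.getD i 0 ∨ mins (a.drop (i + 1)) ≥ a.getD i 0 then answer + 1
    else answer) 0

theorem foldl_min_shift (xs : List Int) (c d : Int) :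
    xs.foldl min (min c d) = min c (xs.foldl min d) := by
  induction xs generalizing d with
  | nil => rfl
  | cons x t ih =>
    simp only [List.foldl_cons]
    rw [min_assoc, ih]

theorem foldl_min_tm (xs : List Int) (c : Int) (h : xs ≠ []) :
    xs.foldl min c = min c (tm xs) := by
  cases xs with
  | nil => simp at h
  | cons x t => simpa [tm, List.foldl_cons] using foldl_min_shift t c x

theorem tm_append (xs ys : List Int) (hx : xs ≠ []) (hy : ys ≠ []) :
    tm (xs ++ ys) = min (tm xs) (tm ys) := by
  cases xs with
  | nil => simp at hx
  | cons x t =>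
    simp only [tm, List.cons_append, List.foldl_append]
    exact foldl_min_tm ys (t.foldl min x) hy

theorem shift_one (j : Nat) : (1 <<< j) = 2 ^ j := by simp [Nat.shiftLeft_eq]

theorem seg_ne (a : List Int) (i k : Nat) (hk : 0 < k) (hi : i < a.length) :
    seg a i k ≠ [] := by
  apply List.ne_nil_of_length_pos
  simp [seg]
  omega

theorem seg_one (a : List Int) (i : Nat) (hi : i < a.length) :
    seg a i 1 = [a.getD i 0] := by
  simp [seg, List.take_one, List.head?_drop, List.getElem?_eq_getElem hi]

theorem tm_singleton (x : Int) : tm [x] = x := rfl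

theorem seg_split (a : List Int) (i h k : Nat) :
    seg a i (h + k) = seg a i h ++ seg a (i + h) k := by
  simp only [seg]
  rw [List.take_add]
  congr 1
  simp [List.drop_drop]

theorem tm_seg_split (a : List Int) (i h : Nat) (hpos : 0 < h)
    (hle : i + h + h ≤ a.length) :
    tm (seg a i (h + h)) = min (tm (seg a i h)) (tm (seg a (i + h) h)) := by
  rw [seg_split]
  exact tm_append _ _ (seg_ne a i h hpos (by omega)) (seg_ne a (i + h) h hpos (by omega))

-- the inner loop body of initRMQ (named for the proofs; initRMQ_eq below is rfl)
def istep (a : List Int) (j : Nat) (D : Nat → Nat → Int) (i : Nat) : Nat → Nat → Int :=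
  if j = 0 then
    fun i' j' => if i' = i ∧ j' = j then PySem.List.pyGetD a (i : Int) 0 else D i' j'
  else if i + (1 <<< j) ≤ a.length then
    fun i' j' => if i' = i ∧ j' = j then
        min (D i (j - 1)) (D (i + (1 <<< (j - 1))) (j - 1))
      else D i' j'
  else D

theorem initRMQ_eq (a : List Int) :
    initRMQ a = (List.range 20).foldl (fun D j => (List.range a.length).foldl (istep a j) D)
      (fun _ _ => 0) := rfl

theorem inner_tab (a : List Int) (j : Nat) (D : Nat → Nat → Int)
    (hD : Tab a D j) (m : Nat) (hm : m ≤ a.length) :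
    (∀ i' j', j' ≠ j → (List.range m).foldl (istep a j) D i' j' = D i' j') ∧
    (∀ i', i' < m → i' + 2 ^ j ≤ a.length →
        (List.range m).foldl (istep a j) D i' j = tm (seg a i' (2 ^ j))) ∧
    (∀ i', m ≤ i' → (List.range m).foldl (istep a j) D i' j = D i' j) := by
  induction m with
  | zero => exact ⟨fun _ _ _ => rfl, fun _ h => absurd h (by omega), fun _ _ => rfl⟩
  | succ m ih =>
    obtain ⟨h1, h2, h3⟩ := ih (by omega)
    rw [List.range_succ, List.foldl_append, List.foldl_cons, List.foldl_nil]
    by_cases hj0 : j = 0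
    · subst hj0
      have hst : istep a 0 ((List.range m).foldl (istep a 0) D) m
          = fun i' j' => if i' = m ∧ j' = 0 then PySem.List.pyGetD a (m : Int) 0
              else (List.range m).foldl (istep a 0) D i' j' := by
        simp [istep]
      rw [hst]
      refine ⟨fun i' j' hne => ?_, fun i' hi' hle => ?_, fun i' hi' => ?_⟩
      · show (if i' = m ∧ j' = 0 then _ else _) = _
        rw [if_neg (by tauto), h1 _ _ hne]
      · show (if i' = m ∧ (0 : Nat) = 0 then _ else _) = _
        by_cases hieq : i' = m
        · rw [if_pos ⟨hieq, rfl⟩, pow_zero, seg_one a i' (by omega), tm_singleton,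
              PySem.List.pyGetD_natCast, hieq]
        · rw [if_neg (by tauto)]
          exact h2 i' (by omega) hle
      · show (if i' = m ∧ (0 : Nat) = 0 then _ else _) = _
        rw [if_neg (by omega), h3 i' (by omega)]
    · by_cases hfire : m + (1 <<< j) ≤ a.length
      · have hst : istep a j ((List.range m).foldl (istep a j) D) m
            = fun i' j' => if i' = m ∧ j' = j then
                min ((List.range m).foldl (istep a j) D m (j - 1))
                  ((List.range m).foldl (istep a j) D (m + (1 <<< (j - 1))) (j - 1))
              else (List.range m).foldl (istep a j) D i' j' := by
          simp [istep, hj0, hfire]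
        rw [hst]
        refine ⟨fun i' j' hne => ?_, fun i' hi' hle => ?_, fun i' hi' => ?_⟩
        · show (if i' = m ∧ j' = j then _ else _) = _
          rw [if_neg (by tauto), h1 _ _ hne]
        · show (if i' = m ∧ j = j then _ else _) = _
          by_cases hieq : i' = m
          · rw [if_pos ⟨hieq, rfl⟩]
            have hj1 : j - 1 < j := by omega
            have hh : (1 <<< (j - 1)) = 2 ^ (j - 1) := shift_one _
            have hpow : 2 ^ (j - 1) + 2 ^ (j - 1) = 2 ^ j := by
              have hps := pow_succ 2 (j - 1)
              rw [show j - 1 + 1 = j from by omega] at hps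
              omega
            have hle' : m + 2 ^ (j - 1) + 2 ^ (j - 1) ≤ a.length := by
              rw [shift_one] at hfire; omega
            rw [h1 m (j - 1) (by omega), h1 (m + (1 <<< (j - 1))) (j - 1) (by omega)]
            rw [hD (j - 1) hj1 m (by omega), hh,
                hD (j - 1) hj1 (m + 2 ^ (j - 1)) (by omega)]
            rw [hieq, ← hpow, tm_seg_split a m (2 ^ (j - 1)) (by positivity) hle']
          · rw [if_neg (by tauto)]
            exact h2 i' (by omega) hle
        · show (if i' = m ∧ j = j then _ else _) = _
          rw [if_neg (by omega), h3 i' (by omega)]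
      · have hst : istep a j ((List.range m).foldl (istep a j) D) m
            = (List.range m).foldl (istep a j) D := by
          simp [istep, hj0, hfire]
        rw [hst]
        refine ⟨h1, fun i' hi' hle => ?_, fun i' hi' => h3 i' (by omega)⟩
        by_cases hieq : i' = m
        · exfalso; rw [shift_one] at hfire; omega
        · exact h2 i' (by omega) hle

theorem initRMQ_tab (a : List Int) : Tab a (initRMQ a) 20 := by
  rw [initRMQ_eq]
  suffices h : ∀ J : Nat,
      Tab a ((List.range J).foldl (fun D j => (List.range a.length).foldl (istep a j) D)
        (fun _ _ => 0)) J from h 20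
  intro J
  induction J with
  | zero => intro j hj; omega
  | succ J ih =>
    rw [List.range_succ, List.foldl_append, List.foldl_cons, List.foldl_nil]
    obtain ⟨h1, h2, h3⟩ := inner_tab a J _ ih a.length le_rfl
    intro j hj i hle
    by_cases hjJ : j = J
    · subst hjJ
      exact h2 i (by have := Nat.one_le_two_pow (n := j); omega) hle
    · rw [h1 i j hjJ]
      exact ih j (by omega) i hle

theorem qloop (a : List Int) (D : Nat → Nat → Int) (hD : Tab a D 20) (e : Nat)
    (he : e ≤ a.length) (k : Nat) :
    ∀ (mr : Int) (cur : Nat), cur ≤ e → e - cur < 2 ^ (k + 1) → e - cur < 2 ^ 20 →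
    ((PySem.List.pyRange (k : Int) (-1) (-1)).foldl (fun (st : Int × Nat) exp =>
        if st.2 + (1 <<< exp.toNat) ≤ e then
          (min st.1 (D st.2 exp.toNat), st.2 + (1 <<< exp.toNat))
        else st) (mr, cur)).1
      = (seg a cur (e - cur)).foldl min mr := by
  induction k with
  | zero =>
    intro mr cur hcur hk h20
    rw [show ((0 : Nat) : Int) = 0 from rfl, PySem.List.pyRange_neg_one_cons (by norm_num),
        show (0 : Int) - 1 = -1 from rfl, PySem.List.pyRange_neg_one_eq_nil le_rfl]
    simp only [List.foldl_cons, List.foldl_nil, Int.toNat_zero, shift_one, pow_zero]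
    by_cases hfire : cur + 1 ≤ e
    · rw [if_pos hfire]
      have h0 : (0 : Nat) < 20 := by norm_num
      rw [hD 0 h0 cur (by omega), pow_zero, seg_one a cur (by omega), tm_singleton,
          show e - cur = 1 from by omega, seg_one a cur (by omega)]
      simp
    · rw [if_neg hfire, show e - cur = 0 from by omega]
      simp [seg]
  | succ k ih =>
    intro mr cur hcur hk h20
    rw [show ((k + 1 : Nat) : Int) = ((k : Nat) : Int) + 1 from by push_cast; ring,
        PySem.List.pyRange_neg_one_cons (by omega),
        show ((k : Nat) : Int) + 1 - 1 = ((k : Nat) : Int) from by ring]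
    simp only [List.foldl_cons]
    have htn : (((k : Nat) : Int) + 1).toNat = k + 1 := by omega
    by_cases hfire : cur + (1 <<< (((k : Nat) : Int) + 1).toNat) ≤ e
    · rw [if_pos hfire]
      rw [htn, shift_one] at hfire ⊢
      have hk20 : k + 1 < 20 := by
        by_contra hge
        have : (2 : Nat) ^ 20 ≤ 2 ^ (k + 1) := Nat.pow_le_pow_right (by norm_num) (by omega)
        omega
      have hDk := hD (k + 1) hk20 cur (by omega)
      have hstep : e - (cur + 2 ^ (k + 1)) < 2 ^ (k + 1) := by
        have : (2 : Nat) ^ (k + 1 + 1) = 2 ^ (k + 1) + 2 ^ (k + 1) := by rw [pow_succ]; ring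
        omega
      rw [ih _ _ (by omega) hstep (by omega), hDk]
      have hsplitn : e - cur = 2 ^ (k + 1) + (e - (cur + 2 ^ (k + 1))) := by omega
      rw [hsplitn, seg_split, List.foldl_append]
      congr 1
      rw [foldl_min_tm _ _ (seg_ne a cur (2 ^ (k + 1)) (by positivity) (by
        have := Nat.one_le_two_pow (n := k + 1); omega))]
    · rw [if_neg hfire]
      rw [htn, shift_one] at hfire
      exact ih mr cur (by omega) (by omega) (by omega)

theorem queryRMQ_eq (a : List Int) (D : Nat → Nat → Int) (hD : Tab a D 20) (b e : Nat)
    (hbe : b ≤ e) (he : e ≤ a.length) (hsmall : e - b < 2 ^ 20) :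
    queryRMQ D b e = mins (seg a b (e - b)) := by
  unfold queryRMQ
  by_cases hbeq : b = e
  · rw [if_pos hbeq, hbeq, show e - e = 0 from by omega]
    simp [seg, mins]
  · rw [if_neg hbeq, show (20 : Int) = ((20 : Nat) : Int) from by norm_num]
    rw [qloop a D hD e he 20 (1000000000 + 1) b hbe (by norm_num; omega) hsmall]
    rfl

theorem solution_eq_cnt (a : List Int) (h : Pre_solution a) : solution a = cnt a := by
  have hD := initRMQ_tab a
  have hn : a.length ≤ 2 ^ 20 := h
  unfold solution cnt
  apply PySem.List.foldl_congr_mem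
  intro acc i hi
  rw [List.mem_range] at hi
  rw [queryRMQ_eq a _ hD 0 i (by omega) (by omega) (by omega),
      queryRMQ_eq a _ hD (i + 1) a.length (by omega) le_rfl (by omega)]
  rw [PySem.List.pyGetD_natCast,
      show seg a 0 (i - 0) = a.take i from by simp [seg],
      show seg a (i + 1) (a.length - (i + 1)) = a.drop (i + 1) from by
        simp only [seg]; rw [List.take_of_length_le (by simp)]]

theorem mins_cons (x : Int) (t : List Int) : mins (x :: t) = min x (mins t) := by
  simp only [mins, List.foldl_cons]
  rw [min_comm 1000000001 x, foldl_min_shift]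

theorem mins_append_singleton (l : List Int) (y : Int) :
    mins (l ++ [y]) = min (mins l) y := by
  simp [mins, List.foldl_append]

theorem sufMins_eq (a : List Int) :
    sufMins a = (List.range (a.length + 1)).map (fun i => mins (a.drop i)) := by
  induction a with
  | nil => rfl
  | cons x t ih =>
    have hh : (sufMins t).headD 1000000001 = mins t := by
      rw [ih, List.range_succ_eq_map]
      simp
    show min ((sufMins t).headD 1000000001) x :: sufMins t = _
    rw [hh]
    have hr : List.range ((x :: t).length + 1) = 0 :: (List.range (t.length + 1)).map Nat.succ := by
      simp [List.range_succ_eq_map]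
    rw [hr, List.map_cons, List.map_map]
    rw [ih, List.drop_zero, mins_cons, min_comm]
    simp [Function.comp]

theorem alt_loop (a : List Int) (m : Nat) (hm : m ≤ a.length) :
    (List.range m).foldl (fun (st : Int × Int) (k : Nat) =>
        ((if st.2 ≥ a.getD k 0 ∨ mins (a.drop (k + 1)) ≥ a.getD k 0 then st.1 + 1 else st.1),
         min st.2 (a.getD k 0))) (0, 1000000001)
    = ((List.range m).foldl (fun answer i =>
        if mins (a.take i) ≥ a.getD i 0 ∨ mins (a.drop (i + 1)) ≥ a.getD i 0 then answer + 1
        else answer) 0,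
       mins (a.take m)) := by
  induction m with
  | zero => simp [mins]
  | succ m ih =>
    rw [List.range_succ, List.foldl_append, List.foldl_append,
        ih (Nat.le_of_succ_le hm)]
    simp only [List.foldl_cons, List.foldl_nil]
    have hlt : m < a.length := hm
    have htake : a.take (m + 1) = a.take m ++ [a.getD m 0] := by
      rw [List.take_add_one, List.getElem?_eq_getElem hlt]
      simp [List.getD, List.getElem?_eq_getElem hlt]
    rw [htake, mins_append_singleton]

theorem alt_eq_cnt (a : List Int) : solution_alt a = cnt a := by
  unfold solution_alt cnt
  rw [PySem.List.enumerate_eq_map_pyRange a 0, List.foldl_map]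
  rw [show PySem.List.len a = (a.length : Int) from by simp, PySem.List.pyRange_zero_nat,
      List.foldl_map]
  rw [PySem.List.foldl_congr_mem _ _ (fun (st : Int × Int) (k : Nat) =>
        ((if st.2 ≥ a.getD k 0 ∨ mins (a.drop (k + 1)) ≥ a.getD k 0 then st.1 + 1 else st.1),
         min st.2 (a.getD k 0))) _ ?_]
  · rw [alt_loop a a.length le_rfl]
  · intro st k hk
    rw [List.mem_range] at hk
    simp only [PySem.List.pyGetD_natCast]
    have h1 : ((k : Int) + 1) = ((k + 1 : Nat) : Int) := by push_cast; ring
    rw [h1, PySem.List.pyGetD_natCast, sufMins_eq,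
        PySem.List.getD_map_range _ _ _ _ (by omega)]

-- ===== VERDICT (by name: the statement is the Claim_ definition above) =====
theorem solution_spec : Claim_equal_solution := by
  intro a _ hpre
  unfold Spec_solution
  rw [solution_eq_cnt a hpre, alt_eq_cnt a]
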